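-- pv_equiv track=rewrite | github.com/zinan92/repo-evals | scripts/reeval_diff.py | _provenance_quality
-- ===== SOURCE A (Python) =====
-- def _provenance_quality(runs: list[dict]) -> str:
--     """Classify baseline provenance quality:
--         full    — every run has provenance.captured == True AND
--                   provenance.partial != True
--         partial — at least one run has captured=True but others are
--                   missing or marked partial
--         missing — no runs, or no run has captured=True
--     """
--     if not runs:
--         return "missing"
--     captured_full = 0
--     captured_partial = 0
--     uncaptured = 0
--     for r in runs:
--         prov = r.get("provenance") or {}
--         if prov.get("captured"):
--             if prov.get("partial"):
--                 captured_partial += 1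
--             else:
--                 captured_full += 1
--         else:
--             uncaptured += 1
--     if captured_full and not (captured_partial or uncaptured):
--         return "full"
--     if captured_full or captured_partial:
--         return "partial"
--     return "missing"
-- ===== SOURCE B (Python) =====
-- def _provenance_quality(runs: list[dict]) -> str:
--     def prov(r):
--         return r.get("provenance") or {}
--
--     def captured(r):
--         return bool(prov(r).get("captured"))
--
--     def partial(r):
--         return bool(prov(r).get("partial"))
--
--     if not any(captured(r) for r in runs):
--         return "missing"
--     if all(captured(r) and not partial(r) for r in runs):
--         return "full"
--     return "partial"
-- ===== Notes on version B (the rewrite author's own statement) =====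
-- stated objective: simpler
-- what changed: Replaces the fused three-counter counting loop with two short-circuiting quantifier passes (any captured / all captured-and-not-partial) over small truthiness helpers, maintaining no accumulators and needing no empty-list guard.
import Mathlib
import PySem

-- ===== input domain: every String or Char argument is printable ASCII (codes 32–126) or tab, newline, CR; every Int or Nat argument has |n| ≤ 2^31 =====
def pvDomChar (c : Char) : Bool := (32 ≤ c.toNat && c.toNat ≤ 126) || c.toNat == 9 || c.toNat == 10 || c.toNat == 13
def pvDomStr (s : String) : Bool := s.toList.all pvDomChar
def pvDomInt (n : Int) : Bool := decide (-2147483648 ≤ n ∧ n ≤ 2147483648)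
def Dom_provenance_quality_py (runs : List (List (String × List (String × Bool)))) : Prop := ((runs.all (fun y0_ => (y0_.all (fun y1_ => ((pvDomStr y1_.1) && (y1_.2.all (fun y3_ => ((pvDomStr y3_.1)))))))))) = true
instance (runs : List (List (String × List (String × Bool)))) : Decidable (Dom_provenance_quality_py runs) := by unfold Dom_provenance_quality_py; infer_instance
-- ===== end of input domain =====

-- B replaces A's fused three-counter loop by two short-circuiting quantifier passes (any/all); same return value.
-- ===== PORT A =====
def provenance_quality_py (runs : List (List (String × List (String × Bool)))) : String :=
  if runs.isEmpty then "missing"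
  else
    let st := runs.foldl (fun (acc : Nat × Nat × Nat) r =>
      -- prov = r.get("provenance") or {}   (List.lookup = first-match dict lookup)
      let prov := match List.lookup "provenance" r with
        | some p => if p.isEmpty then [] else p
        | none => []
      if (List.lookup "captured" prov).getD false then
        if (List.lookup "partial" prov).getD false then (acc.1, acc.2.1 + 1, acc.2.2)
        else (acc.1 + 1, acc.2.1, acc.2.2)
      else (acc.1, acc.2.1, acc.2.2 + 1)) (0, 0, 0)
    if st.1 ≠ 0 ∧ ¬ (st.2.1 ≠ 0 ∨ st.2.2 ≠ 0) then "full"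
    else if st.1 ≠ 0 ∨ st.2.1 ≠ 0 then "partial"
    else "missing"

-- ===== PORT B =====
-- prov(r) = r.get("provenance") or {}
def pvProvOf (r : List (String × List (String × Bool))) : List (String × Bool) :=
  match List.lookup "provenance" r with
  | some p => if p.isEmpty then [] else p
  | none => []

def pvCaptured (r : List (String × List (String × Bool))) : Bool :=
  (List.lookup "captured" (pvProvOf r)).getD false

def pvPartial (r : List (String × List (String × Bool))) : Bool :=
  (List.lookup "partial" (pvProvOf r)).getD false

def provenance_quality_py_alt (runs : List (List (String × List (String × Bool)))) : String :=
  if ¬ runs.any pvCaptured then "missing"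
  else if runs.all (fun r => pvCaptured r && !pvPartial r) then "full"
  else "partial"

-- ===== PRECONDITION & SPEC =====
def Spec_provenance_quality_py (runs : List (List (String × List (String × Bool)))) (out : String) : Prop := out = provenance_quality_py_alt runs
instance (runs : List (List (String × List (String × Bool)))) (out : String) : Decidable (Spec_provenance_quality_py runs out) := by unfold Spec_provenance_quality_py; infer_instance

-- ===== CLAIM (what is proved, stated in full; the proofs are below) =====
def Claim_equal_provenance_quality_py : Prop := ∀ (runs : List (List (String × List (String × Bool)))), Dom_provenance_quality_py runs → Spec_provenance_quality_py runs (provenance_quality_py runs)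

-- ===== LEMMAS AND PROOFS =====

-- A's counting loop computes the three disjoint case counts.
theorem pv_fold_counts (runs : List (List (String × List (String × Bool)))) (a b c : Nat) :
    runs.foldl (fun (acc : Nat × Nat × Nat) r =>
      let prov := match List.lookup "provenance" r with
        | some p => if p.isEmpty then [] else p
        | none => []
      if (List.lookup "captured" prov).getD false then
        if (List.lookup "partial" prov).getD false then (acc.1, acc.2.1 + 1, acc.2.2)
        else (acc.1 + 1, acc.2.1, acc.2.2)
      else (acc.1, acc.2.1, acc.2.2 + 1)) (a, b, c)
    = (a + runs.countP (fun r => pvCaptured r && !pvPartial r),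
       b + runs.countP (fun r => pvCaptured r && pvPartial r),
       c + runs.countP (fun r => !pvCaptured r)) := by
  have hstep : (fun (acc : Nat × Nat × Nat) (r : List (String × List (String × Bool))) =>
        let prov := match List.lookup "provenance" r with
          | some p => if p.isEmpty then [] else p
          | none => []
        if (List.lookup "captured" prov).getD false then
          if (List.lookup "partial" prov).getD false then (acc.1, acc.2.1 + 1, acc.2.2)
          else (acc.1 + 1, acc.2.1, acc.2.2)
        else (acc.1, acc.2.1, acc.2.2 + 1))
      = (fun (acc : Nat × Nat × Nat) r =>
          if pvCaptured r then
            if pvPartial r then (acc.1, acc.2.1 + 1, acc.2.2) else (acc.1 + 1, acc.2.1, acc.2.2)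
          else (acc.1, acc.2.1, acc.2.2 + 1)) := by
    funext acc r; rfl
  rw [hstep]
  induction runs generalizing a b c with
  | nil => simp
  | cons r rs ih =>
    simp only [List.foldl_cons, List.countP_cons]
    by_cases hc : pvCaptured r <;> by_cases hp : pvPartial r <;>
      simp [hc, hp, ih] <;> omega

-- B's `any captured` pass in terms of A's counts.
theorem pv_any_iff (runs : List (List (String × List (String × Bool)))) :
    runs.any pvCaptured = true
      ↔ 0 < runs.countP (fun r => pvCaptured r && !pvPartial r)
            + runs.countP (fun r => pvCaptured r && pvPartial r) := by
  induction runs with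
  | nil => simp
  | cons r rs ih =>
    simp only [List.any_cons, List.countP_cons]
    by_cases hc : pvCaptured r <;> by_cases hp : pvPartial r <;>
      simp [hc, hp, ih]

-- B's `all captured-and-not-partial` pass in terms of A's counts.
theorem pv_all_iff (runs : List (List (String × List (String × Bool)))) :
    runs.all (fun r => pvCaptured r && !pvPartial r) = true
      ↔ runs.countP (fun r => pvCaptured r && pvPartial r) = 0
        ∧ runs.countP (fun r => !pvCaptured r) = 0 := by
  induction runs with
  | nil => simp
  | cons r rs ih =>
    simp only [List.all_cons, List.countP_cons]
    by_cases hc : pvCaptured r <;> by_cases hp : pvPartial r <;>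
      simp [hc, hp, ih]

-- ===== VERDICT (by name: the statement is the Claim_ definition above) =====
theorem provenance_quality_py_spec : Claim_equal_provenance_quality_py := by
  intro runs _
  unfold Spec_provenance_quality_py provenance_quality_py provenance_quality_py_alt
  cases runs with
  | nil => rfl
  | cons r rs =>
    rw [if_neg (by simp), pv_fold_counts]
    have hA := pv_any_iff (r :: rs)
    have hP := pv_all_iff (r :: rs)
    simp only [Nat.zero_add]
    split_ifs with h1 h2 h3 h4 h5 <;>
      first
        | rfl
        | (exfalso
           rw [hA] at *
           rw [hP] at *
           omega)
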